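-- pv_equiv track=rewrite | github.com/viktornilssoninfotiv/advent | Jonte/day14/docking_data.py | float_combos
-- ===== SOURCE A (Python) =====
-- def float_combos(floats):
--     if not floats:
--         return [[]]
--
--     tail = float_combos(floats[1:])
--     head = floats[0]
--
--     f = [[(head[0], False)] + ff for ff in tail]
--     t = [[(head[0], True)] + ff for ff in tail]
--
--     return f + t
-- ===== SOURCE B (Python) =====
-- def float_combos(floats):
--     combos = [[]]
--     for key, _ in floats:
--         combos = [c + [(key, b)] for c in combos for b in (False, True)]
--     return combos
-- ===== Notes on version B (the rewrite author's own statement) =====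
-- stated objective: simpler
-- what changed: Replaces head/tail recursion that prepends the head bit to each recursive combo with a single iterative left-to-right fold that extends each accumulated combo at its end with both bits.
import Mathlib
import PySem

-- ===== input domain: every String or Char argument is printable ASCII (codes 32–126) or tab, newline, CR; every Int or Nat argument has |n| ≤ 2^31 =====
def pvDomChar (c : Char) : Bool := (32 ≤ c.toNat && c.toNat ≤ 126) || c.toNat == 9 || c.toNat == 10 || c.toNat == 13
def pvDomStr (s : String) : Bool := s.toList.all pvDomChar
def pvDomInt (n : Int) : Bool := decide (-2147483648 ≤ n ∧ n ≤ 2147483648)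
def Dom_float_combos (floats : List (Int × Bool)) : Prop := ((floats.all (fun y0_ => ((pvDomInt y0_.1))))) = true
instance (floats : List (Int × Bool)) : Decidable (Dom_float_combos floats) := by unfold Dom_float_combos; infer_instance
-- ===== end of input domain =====

-- B replaces A's head/tail recursion (prepending the head's bit to each recursive combo)
-- with an iterative left fold that appends each element's bit to the end of every accumulated combo.


-- ===== PORT A =====
-- literal transliteration of A: recursion on head/tail, prepend (head.1,False)/(head.1,True)
def float_combos (floats : List (Int × Bool)) : List (List (Int × Bool)) :=
  match floats with
  | [] => [[]]
  | head :: rest =>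
    let tail := float_combos rest
    let f := tail.map (fun ff => [(head.1, false)] ++ ff)
    let t := tail.map (fun ff => [(head.1, true)] ++ ff)
    f ++ t

-- ===== PORT B =====
-- literal transliteration of B: foldl over floats, each step extends every combo with both bits
def float_combos_alt (floats : List (Int × Bool)) : List (List (Int × Bool)) :=
  floats.foldl
    (fun combos kv => combos.flatMap (fun c => [false, true].map (fun b => c ++ [(kv.1, b)])))
    [[]]

-- ===== PRECONDITION & SPEC =====
def Spec_float_combos (floats : List (Int × Bool)) (out : List (List (Int × Bool))) : Prop := out = float_combos_alt floats
instance (floats : List (Int × Bool)) (out : List (List (Int × Bool))) : Decidable (Spec_float_combos floats out) := by unfold Spec_float_combos; infer_instance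

-- ===== CLAIM (what is proved, stated in full; the proofs are below) =====
def Claim_equal_float_combos : Prop := ∀ (floats : List (Int × Bool)), Dom_float_combos floats → Spec_float_combos floats (float_combos floats)

-- ===== LEMMAS AND PROOFS =====

-- Invariant of B's fold: running it from any accumulator `combos` appends every A-combo
-- of `floats` to every accumulated prefix.
theorem float_combos_fold_inv (floats : List (Int × Bool)) (combos : List (List (Int × Bool))) :
    floats.foldl
      (fun combos kv => combos.flatMap (fun c => [false, true].map (fun b => c ++ [(kv.1, b)])))
      combos
    = combos.flatMap (fun c => (float_combos floats).map (fun ff => c ++ ff)) := by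
  induction floats generalizing combos with
  | nil => simp [float_combos]
  | cons head rest ih =>
    rw [List.foldl_cons, ih, List.flatMap_assoc]
    congr 1
    funext c
    simp [float_combos, Function.comp_def, List.map_map, List.append_assoc]

-- ===== VERDICT (by name: the statement is the Claim_ definition above) =====
theorem float_combos_spec : Claim_equal_float_combos := by
  intro floats _
  show float_combos floats = float_combos_alt floats
  rw [float_combos_alt, float_combos_fold_inv]
  simp
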